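-- pv_equiv track=rewrite | github.com/keentooyyy/SaveNLoadModern | SaveNLoad/templatetags/vite.py | _collect_css
-- ===== SOURCE A (Python) =====
-- def _collect_css(manifest: dict, entry_name: str, visited: set[str] | None = None) -> list[str]:
--     if visited is None:
--         visited = set()
--     if entry_name in visited:
--         return []
--     visited.add(entry_name)
--
--     entry = manifest.get(entry_name) or {}
--     css_files = list(entry.get('css', []))
--     for imported in entry.get('imports', []):
--         css_files.extend(_collect_css(manifest, imported, visited))
--     return css_files
-- ===== SOURCE B (Python) =====
-- def _entry(manifest, name):
--     return manifest.get(name) or {}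
--
--
-- def _collect_css(manifest: dict, entry_name: str, visited: set[str] | None = None) -> list[str]:
--     # Two phases: first compute the DFS preorder of newly visited entry names with an
--     # explicit stack (mutating `visited` like the original), then gather each visited
--     # entry's css files in that order.
--     if visited is None:
--         visited = set()
--     order = []
--     stack = [entry_name]
--     while stack:
--         name = stack.pop()
--         if name in visited:
--             continue
--         visited.add(name)
--         order.append(name)
--         stack.extend(reversed(_entry(manifest, name).get('imports', [])))
--     return [f for name in order for f in _entry(manifest, name).get('css', [])]
-- ===== Notes on version B (the rewrite author's own statement) =====
-- stated objective: alternative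
-- what changed: The recursive css-accumulating DFS is replaced by a two-phase iterative algorithm: an explicit-stack loop computes only the DFS preorder list of newly visited entry names (imports pushed reversed), and a second pass (a comprehension) gathers each visited entry's css files in that order; no recursion and no css accumulation inside the traversal.
import Mathlib
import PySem

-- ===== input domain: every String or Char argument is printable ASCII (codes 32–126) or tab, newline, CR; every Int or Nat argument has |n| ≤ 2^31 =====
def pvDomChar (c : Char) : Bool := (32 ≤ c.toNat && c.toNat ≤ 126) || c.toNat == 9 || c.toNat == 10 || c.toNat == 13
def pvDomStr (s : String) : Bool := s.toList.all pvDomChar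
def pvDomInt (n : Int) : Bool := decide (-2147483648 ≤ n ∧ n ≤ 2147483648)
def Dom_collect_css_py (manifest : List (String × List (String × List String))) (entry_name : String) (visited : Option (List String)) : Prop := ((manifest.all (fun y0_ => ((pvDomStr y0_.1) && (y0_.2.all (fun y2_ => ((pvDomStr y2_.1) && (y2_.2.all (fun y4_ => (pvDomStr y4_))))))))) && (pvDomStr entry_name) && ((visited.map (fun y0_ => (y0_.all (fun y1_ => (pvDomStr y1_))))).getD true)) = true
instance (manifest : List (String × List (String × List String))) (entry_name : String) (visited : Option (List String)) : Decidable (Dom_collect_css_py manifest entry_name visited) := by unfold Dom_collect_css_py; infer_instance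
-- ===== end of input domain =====

-- B replaces A's recursive css-accumulating DFS by two phases: an explicit-stack loop computing only
-- the DFS preorder of newly visited names, then a comprehension gathering css per name in that order
-- (same return value; both Pythons mutate the passed-in `visited` set identically — the theorems here
-- are about the return value).

-- ===== PORT A =====
-- A's recursion: the Nat argument is a fuel guard making the recursion total; it is never
-- exhausted, since the nesting depth is bounded by the number of manifest keys.
def goA (m : List (String × List (String × List String))) : Nat → String → List String → List String × List String
  | 0, _, visited => ([], visited)
  | fuel+1, name, visited =>
    if name ∈ visited then ([], visited)
    else
      let visited1 := PySem.Set.add visited name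
      let entry := (m.lookup name).getD []           -- manifest.get(name) or {}  (some [] and none both give {})
      let css := (entry.lookup "css").getD []        -- list(entry.get('css', []))
      let imports := (entry.lookup "imports").getD []
      imports.foldl (fun st imported =>              -- for imported in …: css_files.extend(_collect_css(...))
        let r := goA m fuel imported st.2
        (st.1 ++ r.1, r.2)) (css, visited1)

def collect_css_py (manifest : List (String × List (String × List String))) (entry_name : String) (visited : Option (List String)) : List String :=
  (goA manifest (manifest.length + 1) entry_name (visited.getD [])).1

-- ===== PORT B =====
-- Source B's helper `_entry(manifest, name)`: `manifest.get(name) or {}` (none and some [] both give {}).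
def entryB (m : List (String × List (String × List String))) (name : String) : List (String × List String) :=
  (m.lookup name).getD []

-- Phase 1 of Source B: the while-loop collecting the preorder `order` of newly visited names; the stack is
-- kept top-first, so Python's `stack.extend(reversed(imports))` followed by pop-from-the-end is
-- `imports ++ rest` here. The Nat argument is a fuel guard making the loop total; the chosen initial
-- fuel is never exhausted.
def orderLoop (m : List (String × List (String × List String))) : Nat → List String → List String → List String → List String
  | 0, _, _, order => order
  | fuel+1, stack, visited, order =>
    match stack with
    | [] => order
    | name :: rest =>
      if name ∈ visited then orderLoop m fuel rest visited order
      else orderLoop m fuel (((entryB m name).lookup "imports").getD [] ++ rest)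
             (PySem.Set.add visited name) (order ++ [name])

-- Phase 2 of Source B: the final comprehension, one `flatMap` over `order`.
def collect_css_py_alt (manifest : List (String × List (String × List String))) (entry_name : String) (visited : Option (List String)) : List String :=
  (orderLoop manifest
      (1 + manifest.length * ((manifest.map (fun e => (e.2.map (fun p => p.2.length)).sum)).sum + 1))
      [entry_name] (visited.getD []) []).flatMap
    (fun name => (((entryB manifest name).lookup "css").getD []))

-- ===== PRECONDITION & SPEC =====
def Spec_collect_css_py (manifest : List (String × List (String × List String))) (entry_name : String) (visited : Option (List String)) (out : List String) : Prop := out = collect_css_py_alt manifest entry_name visited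
instance (manifest : List (String × List (String × List String))) (entry_name : String) (visited : Option (List String)) (out : List String) : Decidable (Spec_collect_css_py manifest entry_name visited out) := by unfold Spec_collect_css_py; infer_instance

-- ===== CLAIM (what is proved, stated in full; the proofs are below) =====
def Claim_equal_collect_css_py : Prop := ∀ (manifest : List (String × List (String × List String))) (entry_name : String) (visited : Option (List String)), Dom_collect_css_py manifest entry_name visited → Spec_collect_css_py manifest entry_name visited (collect_css_py manifest entry_name visited)

-- ===== LEMMAS AND PROOFS =====

-- number of not-yet-visited manifest keys (the termination/fuel measure)
def pvC (m : List (String × List (String × List String))) (v : List String) : Nat :=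
  (m.map Prod.fst).countP (fun k => decide (k ∉ v))

-- bound on the length of any single 'imports' list occurring in m
def pvP (m : List (String × List (String × List String))) : Nat :=
  (m.map (fun e => (e.2.map (fun p => p.2.length)).sum)).sum

-- one A-step with canonical (always sufficient) fuel
def stepGo (m : List (String × List (String × List String))) (st : List String × List String) (name : String) : List String × List String :=
  let r := goA m (m.length + 1) name st.2
  (st.1 ++ r.1, r.2)

lemma add_prefix (v : List String) (x : String) : v <+: PySem.Set.add v x := by
  by_cases h : x ∈ v
  · rw [PySem.Set.add_of_mem h]
  · rw [PySem.Set.add_of_not_mem h]; exact ⟨[x], rfl⟩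

lemma lookup_mem {α β : Type} [DecidableEq α] {m : List (α × β)} {n : α} {e : β}
    (h : m.lookup n = some e) : (n, e) ∈ m := by
  induction m with
  | nil => simp [List.lookup] at h
  | cons hd tl ih =>
    obtain ⟨a, b⟩ := hd
    rw [List.lookup_cons] at h
    by_cases hb : n == a
    · simp at hb; simp [hb] at h; simp [hb, h]
    · simp [hb] at h; right; exact ih h

lemma lookup_none_key {α β : Type} [DecidableEq α] {m : List (α × β)} {n : α}
    (h : m.lookup n = none) : n ∉ m.map Prod.fst := by
  induction m with
  | nil => simp
  | cons hd tl ih =>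
    obtain ⟨a, b⟩ := hd
    rw [List.lookup_cons] at h
    by_cases hb : n == a
    · simp [hb] at h
    · simp [hb] at h ih ⊢; simp at hb; exact ⟨hb, ih h⟩

lemma goA_prefix (m : List (String × List (String × List String))) :
    ∀ (f : Nat) (n : String) (v : List String), v <+: (goA m f n v).2 := by
  intro f
  induction f with
  | zero => intro n v; simp [goA]
  | succ f ih =>
    intro n v
    simp only [goA]
    split
    · exact List.prefix_refl v
    · have key : ∀ (l : List String) (st : List String × List String), v <+: st.2 →
          v <+: (l.foldl (fun st imported =>
            ((st.1 ++ (goA m f imported st.2).1), (goA m f imported st.2).2)) st).2 := by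
        intro l
        induction l with
        | nil => intro st hst; exact hst
        | cons x xs ihl =>
          intro st hst
          exact ihl _ (hst.trans (ih x st.2))
      exact key _ _ (add_prefix v n)

lemma pvC_mono (m : List (String × List (String × List String))) {v w : List String}
    (h : v <+: w) : pvC m w ≤ pvC m v := by
  apply List.countP_mono_left
  intro a _ ha
  simp only [decide_eq_true_eq] at ha ⊢
  exact fun hav => ha (h.sublist.mem hav)

lemma pvC_le_length (m : List (String × List (String × List String))) (v : List String) :
    pvC m v ≤ m.length := by
  have := List.countP_le_length (l := m.map Prod.fst) (p := fun k => decide (k ∉ v))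
  simpa [pvC] using this

lemma countP_notin_append_lt {v : List String} {name : String} (hv : name ∉ v) :
    ∀ (l : List String), name ∈ l →
      l.countP (fun k => decide (k ∉ v ++ [name])) + 1 ≤ l.countP (fun k => decide (k ∉ v)) := by
  intro l
  induction l with
  | nil => simp
  | cons a l ihl =>
    intro hmem
    have mono : l.countP (fun k => decide (k ∉ v ++ [name])) ≤ l.countP (fun k => decide (k ∉ v)) := by
      apply List.countP_mono_left
      intro x _ hx
      simp only [decide_eq_true_eq, List.mem_append, List.mem_singleton] at hx ⊢
      exact fun h => hx (Or.inl h)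
    by_cases ha : a = name
    · subst ha
      simp only [List.countP_cons]
      rw [show (decide (a ∉ v ++ [a]) : Bool) = false by simp,
          show (decide (a ∉ v) : Bool) = true by simp [hv]]
      simp only [if_true, if_false, Bool.false_eq_true]
      omega
    · have hmem' : name ∈ l := by
        rcases List.mem_cons.mp hmem with h | h
        · exact absurd h.symm ha
        · exact h
      have := ihl hmem'
      simp only [List.countP_cons]
      have hsame : (decide (a ∉ v ++ [name]) : Bool) = decide (a ∉ v) := by
        simp [List.mem_append, ha]
      rw [hsame]
      omega

lemma pvC_add_lt (m : List (String × List (String × List String))) {v : List String} {name : String}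
    (hk : name ∈ m.map Prod.fst) (hv : name ∉ v) :
    pvC m (PySem.Set.add v name) + 1 ≤ pvC m v := by
  rw [pvC, pvC, PySem.Set.add_of_not_mem hv]
  exact countP_notin_append_lt hv _ hk

lemma pvC_add_eq (m : List (String × List (String × List String))) {v : List String} {name : String}
    (hk : name ∉ m.map Prod.fst) :
    pvC m (PySem.Set.add v name) = pvC m v := by
  by_cases hv : name ∈ v
  · rw [PySem.Set.add_of_mem hv]
  · rw [PySem.Set.add_of_not_mem hv, pvC, pvC]
    apply List.countP_congr
    intro x hx
    have hxne : x ≠ name := fun h => hk (h ▸ hx)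
    simp [List.mem_append, hxne]

lemma lookup_some_key {m : List (String × List (String × List String))} {name : String} {e : List (String × List String)}
    (h : m.lookup name = some e) : name ∈ m.map Prod.fst := by
  exact List.mem_map.mpr ⟨(name, e), lookup_mem h, rfl⟩

lemma imports_le_pvP {m : List (String × List (String × List String))} {name : String} {e : List (String × List String)}
    (h : m.lookup name = some e) : ((e.lookup "imports").getD []).length ≤ pvP m := by
  cases hl : e.lookup "imports" with
  | none => simp
  | some l =>
    simp only [Option.getD_some]
    have h1 : l.length ≤ (e.map (fun p => p.2.length)).sum :=
      List.le_sum_of_mem (List.mem_map.mpr ⟨("imports", l), lookup_mem hl, rfl⟩)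
    have h2 : (e.map (fun p => p.2.length)).sum ≤ pvP m := by
      apply List.le_sum_of_mem
      exact List.mem_map.mpr ⟨(name, e), lookup_mem h, rfl⟩
    omega

-- fuel irrelevance for A's recursion above the measure
lemma goA_fuel (m : List (String × List (String × List String))) :
    ∀ (k : Nat) (v : List String), pvC m v = k → ∀ (n : String) (f1 f2 : Nat),
      pvC m v < f1 → pvC m v < f2 → goA m f1 n v = goA m f2 n v := by
  intro k
  induction k using Nat.strong_induction_on with
  | _ k ih =>
    intro v hv n f1 f2 h1 h2
    obtain ⟨g1, rfl⟩ : ∃ g, f1 = g + 1 := ⟨f1 - 1, by omega⟩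
    obtain ⟨g2, rfl⟩ : ∃ g, f2 = g + 1 := ⟨f2 - 1, by omega⟩
    simp only [goA]
    split
    · rfl
    · rename_i hnv
      cases him : ((((m.lookup n).getD []).lookup "imports").getD []) with
      | nil => rfl
      | cons x xs =>
        -- a nonempty imports list means n is a manifest key, so pvC drops below k
        have hkey : n ∈ m.map Prod.fst := by
          cases hlk : m.lookup n with
          | none => rw [hlk] at him; simp at him
          | some e => exact lookup_some_key hlk
        have hdec : pvC m (PySem.Set.add v n) + 1 ≤ pvC m v := pvC_add_lt m hkey hnv
        have key : ∀ (l : List String) (st : List String × List String),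
            PySem.Set.add v n <+: st.2 →
            l.foldl (fun st imported =>
              ((st.1 ++ (goA m g1 imported st.2).1), (goA m g1 imported st.2).2)) st =
            l.foldl (fun st imported =>
              ((st.1 ++ (goA m g2 imported st.2).1), (goA m g2 imported st.2).2)) st := by
          intro l
          induction l with
          | nil => intro st _; rfl
          | cons y ys ihl =>
            intro st hst
            have hc : pvC m st.2 ≤ pvC m (PySem.Set.add v n) := pvC_mono m hst
            have heq : goA m g1 y st.2 = goA m g2 y st.2 :=
              ih (pvC m st.2) (by omega) st.2 rfl y g1 g2 (by omega) (by omega)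
            simp only [List.foldl_cons, heq]
            exact ihl _ (hst.trans (goA_prefix m g2 y st.2))
        exact key (x :: xs) _ (List.prefix_refl _)

-- unfolding A's recursion with canonical fuel, in terms of stepGo
lemma goA_unfold (m : List (String × List (String × List String))) (name : String) (v : List String) :
    goA m (m.length + 1) name v =
      if name ∈ v then ([], v)
      else
        (((((m.lookup name).getD []).lookup "imports").getD []).foldl (stepGo m)
          ((((m.lookup name).getD []).lookup "css").getD [], PySem.Set.add v name)) := by
  simp only [goA]
  split
  · rfl
  · rename_i hnv
    cases him : ((((m.lookup name).getD []).lookup "imports").getD []) with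
    | nil => rfl
    | cons x xs =>
      have hkey : name ∈ m.map Prod.fst := by
        cases hlk : m.lookup name with
        | none => rw [hlk] at him; simp at him
        | some e => exact lookup_some_key hlk
      have hdec : pvC m (PySem.Set.add v name) + 1 ≤ pvC m v := pvC_add_lt m hkey hnv
      have hlen : pvC m v ≤ m.length := pvC_le_length m v
      have key : ∀ (l : List String) (st : List String × List String),
          PySem.Set.add v name <+: st.2 →
          l.foldl (fun st imported =>
            ((st.1 ++ (goA m m.length imported st.2).1), (goA m m.length imported st.2).2)) st =
          l.foldl (fun st imported =>
            ((st.1 ++ (goA m (m.length + 1) imported st.2).1), (goA m (m.length + 1) imported st.2).2)) st := by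
        intro l
        induction l with
        | nil => intro st _; rfl
        | cons y ys ihl =>
          intro st hst
          have hc : pvC m st.2 ≤ pvC m (PySem.Set.add v name) := pvC_mono m hst
          have heq : goA m m.length y st.2 = goA m (m.length + 1) y st.2 :=
            goA_fuel m (pvC m st.2) st.2 rfl y m.length (m.length + 1) (by omega) (by omega)
          simp only [List.foldl_cons, heq]
          exact ihl _ (hst.trans (goA_prefix m (m.length + 1) y st.2))
      exact key (x :: xs) _ (List.prefix_refl _)

lemma foldl_stepGo_acc (m : List (String × List (String × List String))) :
    ∀ (l : List String) (st : List String × List String),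
      l.foldl (stepGo m) st =
        (st.1 ++ (l.foldl (stepGo m) ([], st.2)).1, (l.foldl (stepGo m) ([], st.2)).2) := by
  intro l
  induction l with
  | nil => intro st; simp
  | cons x xs ih =>
    intro ⟨a, w⟩
    simp only [List.foldl_cons, stepGo, List.nil_append]
    rw [ih (a ++ (goA m (m.length + 1) x w).1, (goA m (m.length + 1) x w).2),
        ih ((goA m (m.length + 1) x w).1, (goA m (m.length + 1) x w).2)]
    simp [List.append_assoc]

-- B's order accumulator commutes out
lemma orderLoop_acc (m : List (String × List (String × List String))) :
    ∀ (f : Nat) (stack v a : List String),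
      orderLoop m f stack v a = a ++ orderLoop m f stack v [] := by
  intro f
  induction f with
  | zero => intro stack v a; simp [orderLoop]
  | succ f ih =>
    intro stack v a
    cases stack with
    | nil => simp [orderLoop]
    | cons name rest =>
      simp only [orderLoop]
      by_cases hmem : name ∈ v
      · simp only [if_pos hmem]; exact ih rest v a
      · simp only [if_neg hmem, List.nil_append]
        rw [ih _ _ (a ++ [name]), ih _ _ [name], List.append_assoc]

-- main simulation: B's preorder list, mapped through css lookup, computes A's fold over the stack
lemma orderLoop_sim (m : List (String × List (String × List String))) :
    ∀ (f : Nat) (stack v : List String),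
      stack.length + pvC m v * (pvP m + 1) ≤ f →
      (orderLoop m f stack v []).flatMap (fun name => (((entryB m name).lookup "css").getD [])) =
        (stack.foldl (stepGo m) ([], v)).1 := by
  intro f
  induction f with
  | zero =>
    intro stack v h
    cases stack with
    | nil => simp [orderLoop]
    | cons a r => simp [List.length_cons] at h
  | succ f ih =>
    intro stack v h
    cases stack with
    | nil => simp [orderLoop]
    | cons name rest =>
      simp only [orderLoop]
      by_cases hmem : name ∈ v
      · rw [if_pos hmem]
        rw [ih rest v (by simp only [List.length_cons] at h; omega)]
        have hstep : stepGo m ([], v) name = ([], v) := by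
          simp [stepGo, goA_unfold, hmem]
        simp only [List.foldl_cons, hstep]
      · rw [if_neg hmem]
        simp only [List.nil_append]
        rw [orderLoop_acc m f _ _ [name]]
        simp only [List.flatMap_append, List.flatMap_cons, List.flatMap_nil, List.append_nil]
        cases hlk : m.lookup name with
        | none =>
          have hnk : name ∉ m.map Prod.fst := lookup_none_key hlk
          rw [show ((entryB m name).lookup "imports").getD [] = ([] : List String) by
                simp [entryB, hlk]]
          simp only [List.nil_append]
          rw [ih rest (PySem.Set.add v name)
            (by
              rw [pvC_add_eq m hnk]
              simp only [List.length_cons] at h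
              omega)]
          have hstep : stepGo m ([], v) name = ([], PySem.Set.add v name) := by
            simp [stepGo, goA_unfold, hmem, hlk]
          simp only [List.foldl_cons, hstep, entryB, hlk]
          simp
        | some e =>
          have hkey : name ∈ m.map Prod.fst := lookup_some_key hlk
          have hdec : pvC m (PySem.Set.add v name) + 1 ≤ pvC m v := pvC_add_lt m hkey hmem
          have himp : ((e.lookup "imports").getD []).length ≤ pvP m := imports_le_pvP hlk
          rw [show ((entryB m name).lookup "imports").getD [] = (e.lookup "imports").getD [] by
                simp [entryB, hlk]]
          rw [ih (((e.lookup "imports").getD []) ++ rest) (PySem.Set.add v name)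
            (by
              have hmul := Nat.mul_le_mul_right (pvP m + 1) hdec
              rw [Nat.add_mul, Nat.one_mul] at hmul
              simp only [List.length_cons] at h
              simp only [List.length_append]
              omega)]
          simp only [List.foldl_cons]
          have hstep : stepGo m ([], v) name =
              (((e.lookup "css").getD []) ++
                ((((e.lookup "imports").getD []).foldl (stepGo m) ([], PySem.Set.add v name)).1),
               ((((e.lookup "imports").getD []).foldl (stepGo m) ([], PySem.Set.add v name)).2)) := by
            simp only [stepGo, goA_unfold, if_neg hmem, hlk, Option.getD_some, List.nil_append]
            rw [foldl_stepGo_acc m _ (((e.lookup "css").getD []), PySem.Set.add v name)]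
          rw [hstep]
          rw [List.foldl_append]
          rw [foldl_stepGo_acc m rest
            ((((e.lookup "imports").getD []).foldl (stepGo m) ([], PySem.Set.add v name)))]
          rw [foldl_stepGo_acc m rest
            (((e.lookup "css").getD []) ++
                ((((e.lookup "imports").getD []).foldl (stepGo m) ([], PySem.Set.add v name)).1),
               ((((e.lookup "imports").getD []).foldl (stepGo m) ([], PySem.Set.add v name)).2))]
          simp [entryB, hlk, List.append_assoc]

-- ===== VERDICT (by name: the statement is the Claim_ definition above) =====
theorem collect_css_py_spec : Claim_equal_collect_css_py := by
  intro m n vis _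
  unfold Spec_collect_css_py collect_css_py collect_css_py_alt
  rw [orderLoop_sim m _ [n] (vis.getD [])]
  · simp [List.foldl, stepGo]
  · have h2 := Nat.mul_le_mul_right (pvP m + 1) (pvC_le_length m (vis.getD []))
    unfold pvP at h2 ⊢
    simp only [List.length_cons, List.length_nil]
    omega
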